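-- pv_equiv track=rewrite | github.com/Sarthak-2329/Story | rabbit_leap.py | solve_with_bfs
-- ===== SOURCE A (Python) =====
-- from collections import deque
--
-- def get_successors(state):
--     """
--     Generates all valid successor states for the Rabbit Leap problem.
--     'E' are east-bound rabbits (can only move right).
--     'W' are west-bound rabbits (can only move left).
--     '_' is the empty stone.
--     """
--     successors = []
--     empty_index = state.find('_')
--
--     # Possible moves for East-bound rabbits ('E') moving right
--     # Slide right: E_ -> _E
--     if empty_index > 0 and state[empty_index - 1] == 'E':
--         new_state = list(state)
--         new_state[empty_index], new_state[empty_index - 1] = new_state[empty_index - 1], new_state[empty_index]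
--         successors.append("".join(new_state))
--
--     # Jump right: EW_ -> _WE
--     if empty_index > 1 and state[empty_index - 2] == 'E' and state[empty_index - 1] == 'W':
--         new_state = list(state)
--         new_state[empty_index], new_state[empty_index - 2] = new_state[empty_index - 2], new_state[empty_index]
--         successors.append("".join(new_state))
--
--     # Possible moves for West-bound rabbits ('W') moving left
--     # Slide left: _W -> W_
--     if empty_index < len(state) - 1 and state[empty_index + 1] == 'W':
--         new_state = list(state)
--         new_state[empty_index], new_state[empty_index + 1] = new_state[empty_index + 1], new_state[empty_index]
--         successors.append("".join(new_state))
--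
--     # Jump left: _EW -> WE_
--     if empty_index < len(state) - 2 and state[empty_index + 2] == 'W' and state[empty_index + 1] == 'E':
--         new_state = list(state)
--         new_state[empty_index], new_state[empty_index + 2] = new_state[empty_index + 2], new_state[empty_index]
--         successors.append("".join(new_state))
--
--     return successors
--
-- def solve_with_bfs(start_state, goal_state):
--     """Solves the problem using Breadth-First Search."""
--     queue = deque([(start_state, [start_state])])
--     visited = {start_state}
--     max_queue_size = 1
--     nodes_visited = 0
--
--     while queue:
--         nodes_visited += 1
--         current_state, path = queue.popleft()
--
--         if current_state == goal_state:
--             return path, nodes_visited, max_queue_size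
--
--         for successor in get_successors(current_state):
--             if successor not in visited:
--                 visited.add(successor)
--                 new_path = path + [successor]
--                 queue.append((successor, new_path))
--                 if len(queue) > max_queue_size:
--                     max_queue_size = len(queue)
--
--     return None, nodes_visited, max_queue_size
-- ===== SOURCE B (Python) =====
-- _RULES = ((-1, None, 'E'), (-2, 'W', 'E'), (1, None, 'W'), (2, 'E', 'W'))
--
-- def _swap(state, i, j):
--     cs = list(state)
--     cs[i], cs[j] = cs[j], cs[i]
--     return ''.join(cs)
--
-- def _moves(state):
--     """Table-driven successor generation: each rule is (offset, required middle, rabbit)."""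
--     e = state.find('_')
--     n = len(state)
--     out = []
--     for d, mid, rabbit in _RULES:
--         if 0 <= e + d <= n - 1 and state[e + d] == rabbit and (mid is None or state[e + d // 2] == mid):
--             out.append(_swap(state, e, e + d))
--     return out
--
-- def solve_with_bfs(start_state, goal_state):
--     """BFS over bare states with a two-list queue and a predecessor map;
--     the path is rebuilt once, by walking parent links from the goal and reversing."""
--     front, back = [start_state], []
--     parent = {}
--     visited = {start_state}
--     max_queue_size = 1
--     nodes_visited = 0
--
--     while front or back:
--         if not front:
--             front, back = back, []
--         nodes_visited += 1
--         current = front[0]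
--         front = front[1:]
--
--         if current == goal_state:
--             path = []
--             node = current
--             while node is not None:
--                 path.append(node)
--                 node = parent.get(node)
--             return path[::-1], nodes_visited, max_queue_size
--
--         for succ in _moves(current):
--             if succ not in visited:
--                 visited.add(succ)
--                 parent[succ] = current
--                 back.append(succ)
--                 if len(front) + len(back) > max_queue_size:
--                     max_queue_size = len(front) + len(back)
--
--     return None, nodes_visited, max_queue_size
-- ===== Notes on version B (the rewrite author's own statement) =====
-- stated objective: alternative
-- what changed: B enqueues bare states in a two-list front/back queue and keeps a predecessor map, rebuilding the path once by walking parent links from the goal, and generates successors from a data table of (offset, middle, rabbit) rules instead of four hand-written branches; A instead copies a growing path list into every queue entry.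
import Mathlib
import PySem

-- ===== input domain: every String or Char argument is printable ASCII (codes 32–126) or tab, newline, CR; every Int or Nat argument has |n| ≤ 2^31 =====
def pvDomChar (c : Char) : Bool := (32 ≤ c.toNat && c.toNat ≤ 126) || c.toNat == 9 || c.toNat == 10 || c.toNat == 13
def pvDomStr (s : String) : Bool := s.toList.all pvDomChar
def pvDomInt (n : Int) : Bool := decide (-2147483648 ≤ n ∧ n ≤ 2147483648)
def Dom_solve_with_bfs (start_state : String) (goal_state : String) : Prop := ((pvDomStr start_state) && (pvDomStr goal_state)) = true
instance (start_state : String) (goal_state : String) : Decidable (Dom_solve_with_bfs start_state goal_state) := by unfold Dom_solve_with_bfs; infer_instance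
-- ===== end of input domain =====

-- B replaces A's path-carrying BFS by a two-list state queue with a predecessor map (path rebuilt
-- once at the goal) and table-driven successor generation; counters are maintained identically.


-- ===== PORT A =====

-- new_state[i], new_state[j] = new_state[j], new_state[i]  (RHS read first, then assign i, then j;
-- exact including Python's negative-index wraparound via pyGetD/pySetD — every access is in range
-- under the guards; also the faithful port of B's helper _swap, which is the same Python code)
def swapState (st : List Char) (i j : Int) : String :=
  String.ofList (PySem.List.pySetD (PySem.List.pySetD st i (PySem.List.pyGetD st j ' ')) j
    (PySem.List.pyGetD st i ' '))

-- A's helper get_successors: four hand-written branches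
def get_successors (state : String) : List String :=
  let st := state.toList
  let e := PySem.Str.find state "_"
  let n : Int := (st.length : Int)
  let s1 := if e > 0 ∧ PySem.List.pyGetD st (e-1) ' ' = 'E' then
      ([] : List String) ++ [swapState st e (e-1)] else []
  let s2 := if e > 1 ∧ PySem.List.pyGetD st (e-2) ' ' = 'E' ∧ PySem.List.pyGetD st (e-1) ' ' = 'W' then
      s1 ++ [swapState st e (e-2)] else s1
  let s3 := if e < n - 1 ∧ PySem.List.pyGetD st (e+1) ' ' = 'W' then
      s2 ++ [swapState st e (e+1)] else s2
  let s4 := if e < n - 2 ∧ PySem.List.pyGetD st (e+2) ' ' = 'W' ∧ PySem.List.pyGetD st (e+1) ' ' = 'E' then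
      s3 ++ [swapState st e (e+2)] else s3
  s4

-- fuel: an upper bound on the number of dequeues (every enqueue after the first adds a fresh state to
-- visited; all reachable states are strings of the start's length, so at most n^n of them);
-- the while-loop itself always terminates, the fuel only makes the recursion structural
def bfsFuel (s : String) : Nat := s.toList.length ^ s.toList.length + 2

-- body of A's 'for successor in get_successors(...)' loop; state = (queue, visited, max_queue_size)
def stepA (path : List String) (st : List (String × List String) × PySem.Set String × Int)
    (succ : String) : List (String × List String) × PySem.Set String × Int :=
  if PySem.Set.contains st.2.1 succ then st
  else
    let vis := PySem.Set.add st.2.1 succ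
    let q := st.1 ++ [(succ, path ++ [succ])]
    let mqs := if ((q.length : Int)) > st.2.2 then (q.length : Int) else st.2.2
    (q, vis, mqs)

-- A's while-loop
def bfsA (goal : String) : Nat → List (String × List String) → PySem.Set String → Int → Int →
    Option (List String) × Int × Int
  | 0, _, _, nv, mqs => (none, nv, mqs)
  | _+1, [], _, nv, mqs => (none, nv, mqs)
  | f+1, (cur, path) :: qs, vis, nv, mqs =>
    if cur == goal then (some path, nv + 1, mqs)
    else
      let st := (get_successors cur).foldl (stepA path) (qs, vis, mqs)
      bfsA goal f st.1 st.2.1 (nv + 1) st.2.2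

def solve_with_bfs (start_state : String) (goal_state : String) : Option (List String) × Int × Int :=
  bfsA goal_state (bfsFuel start_state) [(start_state, [start_state])]
    (PySem.Set.ofList [start_state]) 0 1

-- ===== PORT B =====

-- B's rule table _RULES: (offset d, required middle stone, rabbit letter)
def rulesB : List (Int × Option Char × Char) :=
  [(-1, none, 'E'), (-2, some 'W', 'E'), (1, none, 'W'), (2, some 'E', 'W')]

-- B's _moves: one guarded append per table rule ('state[e+d//2]' via Python floor division)
def movesB (state : String) : List String :=
  let st := state.toList
  let e := PySem.Str.find state "_"
  let n : Int := (st.length : Int)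
  rulesB.foldl (fun out r =>
    if (decide (0 ≤ e + r.1) && decide (e + r.1 ≤ n - 1)
        && (PySem.List.pyGetD st (e + r.1) ' ' == r.2.2)
        && (match r.2.1 with
            | none => true
            | some m => PySem.List.pyGetD st (e + PySem.Int.floordiv r.1 2) ' ' == m)) then
      out ++ [swapState st e (e + r.1)]
    else out) []

-- B's inner reconstruction loop: path.append(node); node = parent.get(node)
-- (fuel = dict size bounds the walk; the result is reversed at the call site, as in the Python)
def walkB (d : PySem.Dict String String) : Nat → String → List String
  | 0, cur => [cur]
  | f+1, cur =>
    match PySem.Dict.get? d cur with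
    | none => [cur]
    | some p => cur :: walkB d f p

-- B's successor loop; only back, parent, visited and max_queue_size change (flen = len(front))
def expandB (cur : String) (flen : Nat) :
    List String → List String → PySem.Dict String String → PySem.Set String → Int →
    List String × PySem.Dict String String × PySem.Set String × Int
  | [], bk, d, vis, mqs => (bk, d, vis, mqs)
  | s :: ss, bk, d, vis, mqs =>
    if PySem.Set.contains vis s then expandB cur flen ss bk d vis mqs
    else
      let bk' := bk ++ [s]
      let len : Int := ((flen + bk'.length : Nat) : Int)
      expandB cur flen ss bk' (d.insert s cur) (PySem.Set.add vis s)
        (if len > mqs then len else mqs)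

-- B's while-loop over the two-list queue (refill front from back when front runs empty)
def bfsB (goal : String) : Nat → List String → List String → PySem.Dict String String →
    PySem.Set String → Int → Int → Option (List String) × Int × Int
  | 0, _, _, _, _, nv, mqs => (none, nv, mqs)
  | f+1, front, back, d, vis, nv, mqs =>
    let fb := if front.isEmpty then (back, ([] : List String)) else (front, back)
    match fb.1, fb.2 with
    | [], _ => (none, nv, mqs)
    | cur :: rest, bk =>
      if cur == goal then (some (walkB d d.size cur).reverse, nv + 1, mqs)
      else
        let st := expandB cur rest.length (movesB cur) bk d vis mqs
        bfsB goal f rest st.1 st.2.1 st.2.2.1 (nv + 1) st.2.2.2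

def solve_with_bfs_alt (start_state : String) (goal_state : String) : Option (List String) × Int × Int :=
  bfsB goal_state (bfsFuel start_state) [start_state] [] PySem.Dict.empty
    (PySem.Set.ofList [start_state]) 0 1

-- ===== PRECONDITION & SPEC =====
def Spec_solve_with_bfs (start_state : String) (goal_state : String) (out : Option (List String) × Int × Int) : Prop := out = solve_with_bfs_alt start_state goal_state
instance (start_state : String) (goal_state : String) (out : Option (List String) × Int × Int) : Decidable (Spec_solve_with_bfs start_state goal_state out) := by unfold Spec_solve_with_bfs; infer_instance

-- ===== CLAIM (what is proved, stated in full; the proofs are below) =====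
def Claim_equal_solve_with_bfs : Prop := ∀ (start_state : String) (goal_state : String), Dom_solve_with_bfs start_state goal_state → Spec_solve_with_bfs start_state goal_state (solve_with_bfs start_state goal_state)

-- ===== LEMMAS AND PROOFS =====

-- B's table-driven move generator computes exactly A's get_successors
lemma movesB_eq (s : String) : movesB s = get_successors s := by
  unfold movesB get_successors rulesB
  simp only [List.foldl_cons, List.foldl_nil]
  set e := PySem.Str.find s "_" with he
  set st := s.toList with hst
  set n : Int := (st.length : Int) with hn
  have fd1 : PySem.Int.floordiv (-2) 2 = -1 := by decide
  have fd2 : PySem.Int.floordiv 2 2 = 1 := by decide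
  simp only [fd1, fd2, Bool.and_eq_true, decide_eq_true_eq, beq_iff_eq]
  simp only [show e + -1 = e - 1 from by ring, show e + -2 = e - 2 from by ring]
  have i1 : (((0 ≤ e - 1 ∧ e - 1 ≤ n - 1) ∧ PySem.List.pyGetD st (e - 1) ' ' = 'E') ∧ True) ↔
      (e > 0 ∧ PySem.List.pyGetD st (e - 1) ' ' = 'E') := by
    have h1 : -1 ≤ e := by simpa using PySem.Chars.neg_one_le_find s.toList "_".toList
    have h2 : e ≤ n := by simpa [hn, hst] using PySem.Chars.find_le_length s.toList "_".toList
    constructor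
    · rintro ⟨⟨⟨a, b⟩, c⟩, -⟩; exact ⟨by omega, c⟩
    · rintro ⟨a, c⟩; exact ⟨⟨⟨by omega, by omega⟩, c⟩, trivial⟩
  have i2 : (((0 ≤ e - 2 ∧ e - 2 ≤ n - 1) ∧ PySem.List.pyGetD st (e - 2) ' ' = 'E') ∧
        PySem.List.pyGetD st (e - 1) ' ' = 'W') ↔
      (e > 1 ∧ PySem.List.pyGetD st (e - 2) ' ' = 'E' ∧ PySem.List.pyGetD st (e - 1) ' ' = 'W') := by
    have h2 : e ≤ n := by simpa [hn, hst] using PySem.Chars.find_le_length s.toList "_".toList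
    constructor
    · rintro ⟨⟨⟨a, b⟩, c⟩, d⟩; exact ⟨by omega, c, d⟩
    · rintro ⟨a, c, d⟩; exact ⟨⟨⟨by omega, by omega⟩, c⟩, d⟩
  have i3 : (((0 ≤ e + 1 ∧ e + 1 ≤ n - 1) ∧ PySem.List.pyGetD st (e + 1) ' ' = 'W') ∧ True) ↔
      (e < n - 1 ∧ PySem.List.pyGetD st (e + 1) ' ' = 'W') := by
    have h1 : -1 ≤ e := by simpa using PySem.Chars.neg_one_le_find s.toList "_".toList
    constructor
    · rintro ⟨⟨⟨a, b⟩, c⟩, -⟩; exact ⟨by omega, c⟩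
    · rintro ⟨a, c⟩; exact ⟨⟨⟨by omega, by omega⟩, c⟩, trivial⟩
  have i4 : (((0 ≤ e + 2 ∧ e + 2 ≤ n - 1) ∧ PySem.List.pyGetD st (e + 2) ' ' = 'W') ∧
        PySem.List.pyGetD st (e + 1) ' ' = 'E') ↔
      (e < n - 2 ∧ PySem.List.pyGetD st (e + 2) ' ' = 'W' ∧ PySem.List.pyGetD st (e + 1) ' ' = 'E') := by
    have h1 : -1 ≤ e := by simpa using PySem.Chars.neg_one_le_find s.toList "_".toList
    constructor
    · rintro ⟨⟨⟨a, b⟩, c⟩, d⟩; exact ⟨by omega, c, d⟩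
    · rintro ⟨a, c, d⟩; exact ⟨⟨⟨by omega, by omega⟩, c⟩, d⟩
  simp only [i1, i2, i3, i4]

-- the reversed path [s, parent s, parent (parent s), ..., root] is a chain in the parent map,
-- ending at a key-free root
def DownChain (d : PySem.Dict String String) : List String → Prop
  | [] => True
  | [x] => PySem.Dict.get? d x = none
  | x :: y :: t => PySem.Dict.get? d x = some y ∧ DownChain d (y :: t)

-- invariant for one of A's queue entries (cur, path), stated against B's parent map and the shared visited set
def EInv (d : PySem.Dict String String) (vis : PySem.Set String) (e : String × List String) : Prop :=
  e.2.reverse.head? = some e.1 ∧ DownChain d e.2.reverse ∧ (∀ x ∈ e.2, x ∈ vis) ∧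
    e.2.length ≤ d.size + 1

lemma walkB_downChain (d : PySem.Dict String String) :
    ∀ (t : List String) (s : String) (f : Nat),
      DownChain d (s :: t) → t.length ≤ f → walkB d f s = s :: t := by
  intro t
  induction t with
  | nil =>
    intro s f h _
    cases f with
    | zero => simp [walkB]
    | succ f => simp [DownChain] at h; simp [walkB, h]
  | cons y t ih =>
    intro s f h hf
    simp only [DownChain] at h
    cases f with
    | zero => simp at hf
    | succ f =>
      simp only [walkB, h.1]
      rw [ih y f h.2 (by simpa using hf)]

lemma downChain_insert (d : PySem.Dict String String) (k v : String) :
    ∀ (r : List String), DownChain d r → (∀ x ∈ r, x ≠ k) → DownChain (d.insert k v) r := by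
  intro r
  induction r with
  | nil => intro _ _; trivial
  | cons x r ih =>
    intro h hx
    cases r with
    | nil =>
      simp only [DownChain] at h ⊢
      rw [PySem.Dict.get?_insert_of_ne d v (hx x (by simp))]; exact h
    | cons y t =>
      simp only [DownChain] at h ⊢
      refine ⟨?_, ih h.2 (fun z hz => hx z (List.mem_cons_of_mem _ hz))⟩
      rw [PySem.Dict.get?_insert_of_ne d v (hx x (by simp))]; exact h.1

lemma EInv_mono (d : PySem.Dict String String) (vis : PySem.Set String) (k v : String)
    (hk : k ∉ vis) (e : String × List String) (h : EInv d vis e) :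
    EInv (d.insert k v) (PySem.Set.add vis k) e := by
  obtain ⟨h1, h2, h3, h4⟩ := h
  refine ⟨h1, ?_, ?_, ?_⟩
  · exact downChain_insert d k v _ h2
      (fun x hx => fun hxk => hk (hxk ▸ h3 x (List.mem_reverse.mp hx)))
  · intro x hx
    exact (PySem.Set.mem_add vis k x).mpr (Or.inl (h3 x hx))
  · rw [PySem.Dict.size_insert]
    split <;> omega

lemma downChain_cons (d : PySem.Dict String String) (s c : String) (r : List String)
    (hr : r.head? = some c) (h : DownChain d r) (hs : PySem.Dict.get? d s = some c) :
    DownChain d (s :: r) := by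
  cases r with
  | nil => simp at hr
  | cons a t =>
    simp only [List.head?_cons, Option.some.injEq] at hr
    exact ⟨hr ▸ hs, h⟩

-- inner-loop correspondence: B's expandB over bare states tracks A's foldl over path-carrying
-- entries, with the whole A queue equal to front-remainder ++ B's back
lemma expand_corr (cur : String) (p : List String) :
    ∀ (l : List String) (fr : List String) (qA : List (String × List String)) (bk : List String)
      (d : PySem.Dict String String) (vis : PySem.Set String) (mqs : Int),
      qA.map Prod.fst = fr ++ bk →
      (∀ e ∈ (cur, p) :: qA, EInv d vis e) → (∀ k ∈ d.keys, k ∈ vis) →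
      ((l.foldl (stepA p) (qA, vis, mqs)).1.map Prod.fst
          = fr ++ (expandB cur fr.length l bk d vis mqs).1 ∧
        (expandB cur fr.length l bk d vis mqs).2.2.1 = (l.foldl (stepA p) (qA, vis, mqs)).2.1 ∧
        (expandB cur fr.length l bk d vis mqs).2.2.2 = (l.foldl (stepA p) (qA, vis, mqs)).2.2 ∧
        (∀ e ∈ (cur, p) :: (l.foldl (stepA p) (qA, vis, mqs)).1,
          EInv (expandB cur fr.length l bk d vis mqs).2.1
               (expandB cur fr.length l bk d vis mqs).2.2.1 e) ∧
        (∀ k ∈ (expandB cur fr.length l bk d vis mqs).2.1.keys,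
          k ∈ (expandB cur fr.length l bk d vis mqs).2.2.1)) := by
  intro l
  induction l with
  | nil =>
    intro fr qA bk d vis mqs hmap hq hkeys
    exact ⟨hmap, rfl, rfl, hq, hkeys⟩
  | cons succ l ih =>
    intro fr qA bk d vis mqs hmap hq hkeys
    simp only [List.foldl_cons, expandB]
    by_cases hm : succ ∈ vis
    · have hc : PySem.Set.contains vis succ = true := (PySem.Set.contains_iff vis succ).mpr hm
      have hA : stepA p (qA, vis, mqs) succ = (qA, vis, mqs) := by simp [stepA, hm]
      rw [hA, if_pos hc]
      exact ih fr qA bk d vis mqs hmap hq hkeys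
    · have hnot : succ ∉ vis := hm
      have hc : PySem.Set.contains vis succ = false := by
        rcases Bool.eq_false_or_eq_true (PySem.Set.contains vis succ) with h | h
        · exact absurd ((PySem.Set.contains_iff vis succ).mp h) hnot
        · exact h
      have hdc : d.contains succ = false := by
        rcases Bool.eq_false_or_eq_true (d.contains succ) with h | h
        · exact absurd (hkeys succ ((PySem.Dict.contains_iff_mem_keys d succ).mp h)) hnot
        · exact h
      have hlen : qA.length = fr.length + bk.length := by
        have := congrArg List.length hmap
        simpa using this
      have hA : stepA p (qA, vis, mqs) succ
          = (qA ++ [(succ, p ++ [succ])], PySem.Set.add vis succ,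
             if (((qA ++ [(succ, p ++ [succ])]).length : Int)) > mqs
             then ((qA ++ [(succ, p ++ [succ])]).length : Int) else mqs) := by
        simp only [stepA, hc, Bool.false_eq_true, if_false]
      rw [hA]
      simp only [hc, Bool.false_eq_true, if_false]
      have hlen2 : ((fr.length + (bk ++ [succ]).length : Nat) : Int)
          = (((qA ++ [(succ, p ++ [succ])]).length : Nat) : Int) := by
        simp [hlen]
        ring
      rw [hlen2]
      obtain ⟨h1, h2, h3, h4⟩ := hq (cur, p) (by simp)
      have hchain := downChain_insert d succ cur p.reverse h2
        (fun x hx hxk => hnot (hxk ▸ h3 x (List.mem_reverse.mp hx)))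
      have hnewInv : ∀ e ∈ (cur, p) :: (qA ++ [(succ, p ++ [succ])]),
          EInv (d.insert succ cur) (PySem.Set.add vis succ) e := by
        intro e he
        rcases List.mem_cons.mp he with rfl | he
        · exact EInv_mono d vis succ cur hnot _ (hq _ (by simp))
        rcases List.mem_append.mp he with he | he
        · exact EInv_mono d vis succ cur hnot _ (hq _ (by simp [he]))
        · simp only [List.mem_singleton] at he; subst he
          refine ⟨by simp, ?_, ?_, ?_⟩
          · show DownChain _ ((p ++ [succ]).reverse)
            have : (p ++ [succ]).reverse = succ :: p.reverse := by simp
            rw [this]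
            exact downChain_cons _ _ _ _ h1 hchain (PySem.Dict.get?_insert_self d succ cur)
          · intro x hx
            rcases List.mem_append.mp hx with hx | hx
            · exact (PySem.Set.mem_add vis succ x).mpr (Or.inl (h3 x hx))
            · simp only [List.mem_singleton] at hx
              exact (PySem.Set.mem_add vis succ x).mpr (Or.inr hx)
          · have h4' : p.length ≤ d.size + 1 := h4
            simp only [List.length_append, List.length_singleton,
              PySem.Dict.size_insert, hdc, Bool.false_eq_true, if_false]
            omega
      have hnewkeys : ∀ k ∈ (d.insert succ cur).keys, k ∈ PySem.Set.add vis succ := by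
        intro k hk
        rw [PySem.Dict.keys_insert_of_not_contains d cur hdc] at hk
        rcases List.mem_append.mp hk with hk | hk
        · exact (PySem.Set.mem_add vis succ k).mpr (Or.inl (hkeys k hk))
        · simp only [List.mem_singleton] at hk
          exact (PySem.Set.mem_add vis succ k).mpr (Or.inr hk)
      exact ih fr (qA ++ [(succ, p ++ [succ])]) (bk ++ [succ]) (d.insert succ cur)
        (PySem.Set.add vis succ)
        (if (((qA ++ [(succ, p ++ [succ])]).length : Int)) > mqs
         then ((qA ++ [(succ, p ++ [succ])]).length : Int) else mqs)
        (by simp [hmap]) hnewInv hnewkeys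

-- outer-loop correspondence: B's two-list queue of bare states tracks A's queue of entries
lemma bfs_corr (goal : String) :
    ∀ (f : Nat) (qA : List (String × List String)) (front back : List String)
      (d : PySem.Dict String String) (vis : PySem.Set String) (nv mqs : Int),
      qA.map Prod.fst = front ++ back →
      (∀ e ∈ qA, EInv d vis e) → (∀ k ∈ d.keys, k ∈ vis) →
      bfsB goal f front back d vis nv mqs = bfsA goal f qA vis nv mqs := by
  intro f
  induction f with
  | zero => intro qA front back d vis nv mqs _ _ _; rfl
  | succ f ih =>
    intro qA front back d vis nv mqs hmap hq hkeys
    have key : ∀ (fr bk : List String), (fr = [] → bk = []) → qA.map Prod.fst = fr ++ bk →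
        (match fr, bk with
          | [], _ => (none, nv, mqs)
          | cur :: rest, bk =>
            if cur == goal then (some (walkB d d.size cur).reverse, nv + 1, mqs)
            else
              let st := expandB cur rest.length (movesB cur) bk d vis mqs
              bfsB goal f rest st.1 st.2.1 st.2.2.1 (nv + 1) st.2.2.2)
          = bfsA goal (f+1) qA vis nv mqs := by
      intro fr bk hnil hfb
      cases fr with
      | nil =>
        rw [hnil rfl] at hfb
        have : qA = [] := by simpa using hfb
        subst this; rfl
      | cons cur rest =>
        cases qA with
        | nil => simp at hfb
        | cons e qs =>
          obtain ⟨c0, p⟩ := e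
          simp only [List.map_cons, List.cons_append, List.cons.injEq] at hfb
          obtain ⟨rfl, hfb2⟩ := hfb
          show _ = bfsA goal (f+1) ((c0, p) :: qs) vis nv mqs
          simp only [bfsA]
          by_cases hgoal : (c0 == goal) = true
          · simp only [hgoal, if_true]
            obtain ⟨h1, h2, h3, h4⟩ := hq (c0, p) (by simp)
            cases hrev : p.reverse with
            | nil => rw [hrev] at h1; simp at h1
            | cons a t =>
              rw [hrev] at h1 h2
              simp only [List.head?_cons, Option.some.injEq] at h1
              subst h1
              have hl : t.length ≤ d.size := by
                have hp : p.length = t.length + 1 := by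
                  simpa using congrArg List.length hrev
                simp only [hp] at h4
                omega
              rw [walkB_downChain d t a d.size h2 hl]
              have : (a :: t).reverse = p := by
                rw [← hrev, List.reverse_reverse]
              rw [this]
          · rw [if_neg hgoal, if_neg hgoal, movesB_eq]
            obtain ⟨e1, e2, e3, e4, e5⟩ :=
              expand_corr c0 p (get_successors c0) rest qs bk d vis mqs hfb2 hq hkeys
            rw [← e2, ← e3]
            exact ih _ rest _ _ _ (nv + 1) _ e1
              (fun e he => e4 e (List.mem_cons_of_mem _ he)) e5
    cases front with
    | nil => exact key back [] (fun _ => rfl) (by simpa using hmap)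
    | cons f0 fs => exact key (f0 :: fs) back (fun h => nomatch h) hmap

-- ===== VERDICT (by name: the statement is the Claim_ definition above) =====
theorem solve_with_bfs_spec : Claim_equal_solve_with_bfs := by
  intro s g _
  unfold Spec_solve_with_bfs solve_with_bfs solve_with_bfs_alt
  refine (bfs_corr g (bfsFuel s) [(s, [s])] [s] [] PySem.Dict.empty (PySem.Set.ofList [s]) 0 1
    (by simp) ?_ ?_).symm
  · intro e he
    simp only [List.mem_singleton] at he
    subst he
    refine ⟨rfl, ?_, ?_, by simp [PySem.Dict.size]⟩
    · simp [DownChain, PySem.Dict.get?_empty]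
    · intro x hx; simp at hx; simp [hx, PySem.Set.ofList, PySem.Set.add]
  · intro k hk; simp [PySem.Dict.keys_empty] at hk
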